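-- pv_equiv track=rewrite | github.com/ezmesh/ezos | tools/gen_bdf_font.py | extract_bits
-- ===== SOURCE A (Python) =====
-- def extract_bits(rows: list, width: int) -> list:
--     """Decode BDF BITMAP hex rows into a flat bit list (MSB-first per byte,
--     truncated to `width` bits per row)."""
--     bits = []
--     for row in rows:
--         # Each row is big-endian hex, padded up to full bytes.
--         value = int(row, 16) if row else 0
--         total_bits = len(row) * 4
--         # Bits are MSB-first within the row; take the leftmost `width`.
--         for i in range(width):
--             if i >= total_bits:
--                 bits.append(0)
--                 continue
--             bit = (value >> (total_bits - 1 - i)) & 1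
--             bits.append(bit)
--     return bits
-- ===== SOURCE B (Python) =====
-- def extract_bits(rows: list, width: int) -> list:
--     """Decode BDF BITMAP hex rows into a flat bit list: per row, shift the
--     value down to the width-window once, then peel bits off LSB-first by
--     repeated halving, reverse, and pad the remainder with zeros as a block."""
--     w = max(width, 0)
--     out = []
--     for row in rows:
--         tb = len(row) * 4
--         v = int(row, 16) if row else 0
--         n = min(w, tb)
--         x = v >> (tb - n)
--         rev = []
--         for _ in range(n):
--             rev.append(x & 1)
--             x >>= 1
--         rev.reverse()
--         out += rev + [0] * (w - n)
--     return out
-- ===== Notes on version B (the rewrite author's own statement) =====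
-- stated objective: alternative
-- what changed: Per row, instead of A's loop over all width indices that recomputes a full shift (value >> (total_bits-1-i)) & 1 and guards each index against the row end, B shifts the row value down to the width-window once, peels the window's bits off LSB-first by repeated halving (x & 1; x >>= 1), reverses, and appends the zero padding as one block.
import Mathlib
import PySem

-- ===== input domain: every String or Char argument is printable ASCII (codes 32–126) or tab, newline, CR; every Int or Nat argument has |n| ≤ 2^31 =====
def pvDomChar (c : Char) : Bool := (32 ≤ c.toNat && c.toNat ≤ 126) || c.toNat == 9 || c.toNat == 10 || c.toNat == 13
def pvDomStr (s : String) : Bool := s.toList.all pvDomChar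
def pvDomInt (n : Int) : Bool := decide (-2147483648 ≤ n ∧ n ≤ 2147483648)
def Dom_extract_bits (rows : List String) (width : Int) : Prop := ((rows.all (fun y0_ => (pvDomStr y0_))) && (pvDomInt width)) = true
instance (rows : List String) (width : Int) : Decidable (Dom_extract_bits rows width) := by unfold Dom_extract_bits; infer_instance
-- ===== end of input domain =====

-- B replaces A's per-index big shifts and in-loop zero guard by one window shift,
-- an LSB-first peel-by-halving loop, a reverse, and block zero padding (objective: alternative).

-- ===== PORT A =====
def extract_bits (rows : List String) (width : Int) : List Int :=
  rows.foldl (fun bits row =>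
    let value : Int := if row ≠ "" then (PySem.Int.ofStrBase? row 16).getD 0 else 0
    let total_bits : Int := (PySem.Str.len row) * 4
    (PySem.List.pyRange 0 width 1).foldl (fun bits i =>
      if i ≥ total_bits then bits ++ [0]
      else bits ++ [PySem.Int.band (value >>> (total_bits - 1 - i).toNat) 1]) bits) []

-- ===== PORT B =====
def extract_bits_alt (rows : List String) (width : Int) : List Int :=
  let w : Int := max width 0
  rows.foldl (fun out row =>
    let tb : Int := (PySem.Str.len row) * 4
    let v : Int := if row ≠ "" then (PySem.Int.ofStrBase? row 16).getD 0 else 0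
    let n : Int := min w tb
    let x : Int := v >>> (tb - n).toNat
    let p : List Int × Int := (PySem.List.pyRange 0 n 1).foldl
      (fun (s : List Int × Int) _ => (s.1 ++ [PySem.Int.band s.2 1], s.2 >>> (1 : Nat))) ([], x)
    out ++ p.1.reverse ++ List.replicate (w - n).toNat 0) []

-- ===== PRECONDITION & SPEC =====
-- Pre_ excludes exactly the inputs where Python A raises ValueError: a non-empty row that
-- int(row, 16) cannot parse (empty rows are accepted by A without parsing).
def Pre_extract_bits (rows : List String) (width : Int) : Prop :=
  ∀ row ∈ rows, row = "" ∨ (PySem.Int.ofStrBase? row 16).isSome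
instance (rows : List String) (width : Int) : Decidable (Pre_extract_bits rows width) := by unfold Pre_extract_bits; infer_instance

def pvWitness_extract_bits : List String × Int := (["1f", "A0", ""], 7)

def Spec_extract_bits (rows : List String) (width : Int) (out : List Int) : Prop := out = extract_bits_alt rows width
instance (rows : List String) (width : Int) (out : List Int) : Decidable (Spec_extract_bits rows width out) := by unfold Spec_extract_bits; infer_instance

-- ===== CLAIM (what is proved, stated in full; the proofs are below) =====
def Claim_equal_extract_bits : Prop := ∀ (rows : List String) (width : Int), Dom_extract_bits rows width → Pre_extract_bits rows width → Spec_extract_bits rows width (extract_bits rows width)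

-- ===== LEMMAS AND PROOFS =====

-- B's inner peel loop: after k ignored steps the state is (acc ++ the k low bits of x, x >>> k).
theorem peel_loop (l : List Int) (acc : List Int) (x : Int) :
    l.foldl (fun (s : List Int × Int) _ => (s.1 ++ [PySem.Int.band s.2 1], s.2 >>> (1 : Nat))) (acc, x)
      = (acc ++ (List.range l.length).map (fun (j : Nat) => PySem.Int.band (x >>> j) 1), x >>> l.length) := by
  induction l generalizing acc x with
  | nil => simp
  | cons a t ih =>
      simp only [List.foldl_cons, ih, List.length_cons, List.range_succ_eq_map]
      simp only [Prod.mk.injEq]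
      refine ⟨?_, ?_⟩
      · have h0 : PySem.Int.band (x >>> (0 : Nat)) 1 = PySem.Int.band x 1 := by norm_num
        have hm : List.map (fun (j : Nat) => PySem.Int.band (x >>> (1 : Nat) >>> j) 1) (List.range t.length)
            = List.map ((fun (j : Nat) => PySem.Int.band (x >>> j) 1) ∘ Nat.succ) (List.range t.length) := by
          apply List.map_congr_left; intro j _
          simp only [Function.comp_apply]
          rw [← Int.shiftRight_add]
          congr 2
          omega
        simp only [List.map_cons, List.map_map, hm, h0]
        simp
      · rw [← Int.shiftRight_add]
        congr 1
        omega

-- A's inner loop appends one element per index.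
theorem a_inner (width tb v : Int) (bits : List Int) :
    (PySem.List.pyRange 0 width 1).foldl (fun bits i =>
        if i ≥ tb then bits ++ [0]
        else bits ++ [PySem.Int.band (v >>> (tb - 1 - i).toNat) 1]) bits
      = bits ++ (PySem.List.pyRange 0 width 1).map
          (fun i => if i ≥ tb then 0 else PySem.Int.band (v >>> (tb - 1 - i).toNat) 1) := by
  have h : (fun (bits : List Int) (i : Int) =>
      if i ≥ tb then bits ++ [0]
      else bits ++ [PySem.Int.band (v >>> (tb - 1 - i).toNat) 1])
    = (fun bits i => bits ++ [if i ≥ tb then 0 else PySem.Int.band (v >>> (tb - 1 - i).toNat) 1]) := by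
    funext bits i; split <;> rfl
  rw [h, PySem.List.foldl_append_singleton_eq_map]

-- the per-row blocks agree
theorem row_block (width tb v : Int) (htb : 0 ≤ tb) :
    (PySem.List.pyRange 0 width 1).map
        (fun i => if i ≥ tb then 0 else PySem.Int.band (v >>> (tb - 1 - i).toNat) 1)
      = ((List.range (min (max width 0) tb).toNat).map
            (fun (j : Nat) => PySem.Int.band ((v >>> (tb - min (max width 0) tb).toNat) >>> j) 1)).reverse
        ++ List.replicate (max width 0 - min (max width 0) tb).toNat 0 := by
  set w : Int := max width 0 with hw
  set n : Int := min w tb with hn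
  have hn0 : 0 ≤ n := by omega
  have hwn : n ≤ w := by omega
  have hnt : n ≤ tb := by omega
  apply List.ext_getElem
  · simp [PySem.List.length_pyRange_one]
    omega
  · intro k h1 h2
    have hk : (k : Int) < width := by
      have := PySem.List.length_pyRange_one 0 width
      simp [this] at h1; omega
    have hkw : (k : Int) < w := by omega
    rw [List.getElem_map, PySem.List.getElem_pyRange_one]
    by_cases hcase : k < n.toNat
    · -- inside the window: the reversed peel list
      have hlen : ((List.range n.toNat).map
          (fun (j : Nat) => PySem.Int.band ((v >>> (tb - n).toNat) >>> j) 1)).reverse.length = n.toNat := by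
        simp
      rw [List.getElem_append_left (by rw [hlen]; exact hcase)]
      rw [List.getElem_reverse]
      simp only [List.getElem_map, List.getElem_range, List.length_map, List.length_range]
      have hnot : ¬ ((0 : Int) + k ≥ tb) := by omega
      rw [if_neg hnot, ← Int.shiftRight_add]
      congr 2
      omega
    · -- past the window: zero padding, and A's guard fires (n = tb here)
      have hlen : ((List.range n.toNat).map
          (fun (j : Nat) => PySem.Int.band ((v >>> (tb - n).toNat) >>> j) 1)).reverse.length = n.toNat := by
        simp
      rw [List.getElem_append_right (by rw [hlen]; omega)]
      rw [List.getElem_replicate]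
      have hntb : n = tb := by omega
      have : (0 : Int) + k ≥ tb := by omega
      rw [if_pos this]

theorem extract_bits_eq (rows : List String) (width : Int) :
    extract_bits rows width = extract_bits_alt rows width := by
  unfold extract_bits extract_bits_alt
  simp only []
  induction rows using List.reverseRecOn with
  | nil => rfl
  | append_singleton rs row ih =>
      rw [List.foldl_append, List.foldl_append, ih]
      simp only [List.foldl_cons, List.foldl_nil]
      rw [a_inner, peel_loop]
      simp only [PySem.List.length_pyRange_one]
      rw [List.append_assoc]
      congr 1
      have htb : (0 : Int) ≤ PySem.Str.len row * 4 := by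
        simp only [PySem.Str.len_eq]
        positivity
      rw [row_block width (PySem.Str.len row * 4)
        (if row ≠ "" then (PySem.Int.ofStrBase? row 16).getD 0 else 0) htb]
      simp

-- ===== VERDICT (by name: the statement is the Claim_ definition above) =====
theorem extract_bits_spec : Claim_equal_extract_bits := by
  intro rows width _ _
  unfold Spec_extract_bits
  exact extract_bits_eq rows width
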